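-- pv_equiv track=rewrite | github.com/transitmatters/new-train-tracker | server/mbta_api.py | reverse_if_stops_out_of_order
-- ===== SOURCE A (Python) =====
-- def reverse_if_stops_out_of_order(stops, first_expected_stop_name, second_expected_stop_name):
--     try:
--         (index_of_first, index_of_second) = (
--             next(index for index, stop in enumerate(stops) if stop["name"] == stop_name)
--             for stop_name in (first_expected_stop_name, second_expected_stop_name)
--         )
--         if index_of_first > index_of_second:
--             return list(reversed(stops))
--         return stops
--     except (StopIteration, RuntimeError):
--         # This shouldn't happen if we specified our stops right
--         return stops
-- ===== SOURCE B (Python) =====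
-- def reverse_if_stops_out_of_order(stops, first_expected_stop_name, second_expected_stop_name):
--     index_of_first = None
--     index_of_second = None
--     for index, stop in enumerate(stops):
--         if index_of_first is None and stop["name"] == first_expected_stop_name:
--             index_of_first = index
--         if index_of_second is None and stop["name"] == second_expected_stop_name:
--             index_of_second = index
--         if index_of_first is not None and index_of_second is not None:
--             break
--     if index_of_first is not None and index_of_second is not None and index_of_first > index_of_second:
--         return list(reversed(stops))
--     return stops
-- ===== Notes on version B (the rewrite author's own statement) =====
-- stated objective: alternative
-- what changed: Replaces the two generator-expression scans unpacked through a try/except with a single enumerate loop that tracks both optional indices and breaks as soon as both are found, handling not-found as a still-None index instead of catching StopIteration/RuntimeError.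
import Mathlib
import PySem

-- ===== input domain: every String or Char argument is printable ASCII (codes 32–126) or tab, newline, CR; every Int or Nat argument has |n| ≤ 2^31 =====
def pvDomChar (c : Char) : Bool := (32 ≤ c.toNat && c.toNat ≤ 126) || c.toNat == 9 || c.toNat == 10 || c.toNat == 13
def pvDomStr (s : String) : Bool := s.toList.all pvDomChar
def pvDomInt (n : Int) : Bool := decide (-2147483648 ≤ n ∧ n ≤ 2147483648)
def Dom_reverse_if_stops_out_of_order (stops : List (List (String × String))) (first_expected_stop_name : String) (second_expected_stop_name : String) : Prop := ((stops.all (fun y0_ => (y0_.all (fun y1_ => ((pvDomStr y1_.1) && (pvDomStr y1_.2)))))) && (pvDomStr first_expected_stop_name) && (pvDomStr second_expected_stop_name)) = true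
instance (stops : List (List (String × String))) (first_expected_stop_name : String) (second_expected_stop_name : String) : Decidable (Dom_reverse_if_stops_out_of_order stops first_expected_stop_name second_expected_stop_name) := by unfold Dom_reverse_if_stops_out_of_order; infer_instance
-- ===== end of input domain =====

-- B replaces A's two generator scans + try/except by one enumerate loop tracking both indices with an early break (objective: alternative, same cost).


-- shared dict lookup: stop["name"] = first match in the association list (Python dict keys are unique)
def pvName (stop : List (String × String)) : Option String := stop.lookup "name"

-- ===== PORT A =====
-- `next(index for index, stop in enumerate(stops) if stop["name"] == name)`:
-- returns the first matching index, none = StopIteration/RuntimeError (caught by A).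
-- A missing "name" key (KeyError, uncaught in Python) is excluded by Pre_; here it is treated as a non-match.
def pvScanA (k : Nat) (stops : List (List (String × String))) (name : String) : Option Nat :=
  match stops with
  | [] => none
  | s :: rest => if pvName s = some name then some k else pvScanA (k + 1) rest name

def reverse_if_stops_out_of_order (stops : List (List (String × String))) (first_expected_stop_name : String) (second_expected_stop_name : String) : List (List (String × String)) :=
  match pvScanA 0 stops first_expected_stop_name with
  | none => stops                        -- except branch: return stops
  | some index_of_first =>
    match pvScanA 0 stops second_expected_stop_name with
    | none => stops                      -- except branch: return stops
    | some index_of_second =>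
      if index_of_first > index_of_second then stops.reverse else stops

-- ===== PORT B =====
-- B's single for-loop over enumerate(stops) with two Optional indices and an early break once both are set.
def pvLoopB (k : Nat) (i? j? : Option Nat) (fn sn : String) (stops : List (List (String × String))) : Option Nat × Option Nat :=
  match stops with
  | [] => (i?, j?)
  | s :: rest =>
    let nm := pvName s
    let i?' := if i?.isNone && (nm = some fn : Bool) then some k else i?
    let j?' := if j?.isNone && (nm = some sn : Bool) then some k else j?
    if i?'.isSome && j?'.isSome then (i?', j?')       -- break
    else pvLoopB (k + 1) i?' j?' fn sn rest

def reverse_if_stops_out_of_order_alt (stops : List (List (String × String))) (first_expected_stop_name : String) (second_expected_stop_name : String) : List (List (String × String)) :=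
  match pvLoopB 0 none none first_expected_stop_name second_expected_stop_name stops with
  | (some i, some j) => if i > j then stops.reverse else stops
  | _ => stops

-- ===== PRECONDITION & SPEC =====
-- Pre_ excludes exactly the inputs on which Python A raises KeyError: a stop without a
-- "name" key that the scans reach, i.e. one not preceded by occurrences of both expected names.
def Pre_reverse_if_stops_out_of_order (stops : List (List (String × String))) (first_expected_stop_name : String) (second_expected_stop_name : String) : Prop :=
  ∀ k, k < stops.length →
    (pvName (stops.getD k [])).isSome = true ∨
    ((stops.take k).any (fun s => pvName s = some first_expected_stop_name) = true ∧
     (stops.take k).any (fun s => pvName s = some second_expected_stop_name) = true)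
instance (stops : List (List (String × String))) (first_expected_stop_name : String) (second_expected_stop_name : String) : Decidable (Pre_reverse_if_stops_out_of_order stops first_expected_stop_name second_expected_stop_name) := by unfold Pre_reverse_if_stops_out_of_order; infer_instance

def pvWitness_reverse_if_stops_out_of_order : (List (List (String × String))) × String × String :=
  ([[("name", "Alewife")], [("name", "Davis")]], "Davis", "Alewife")

def Spec_reverse_if_stops_out_of_order (stops : List (List (String × String))) (first_expected_stop_name : String) (second_expected_stop_name : String) (out : List (List (String × String))) : Prop := out = reverse_if_stops_out_of_order_alt stops first_expected_stop_name second_expected_stop_name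
instance (stops : List (List (String × String))) (first_expected_stop_name : String) (second_expected_stop_name : String) (out : List (List (String × String))) : Decidable (Spec_reverse_if_stops_out_of_order stops first_expected_stop_name second_expected_stop_name out) := by unfold Spec_reverse_if_stops_out_of_order; infer_instance

-- ===== CLAIM (what is proved, stated in full; the proofs are below) =====
def Claim_equal_reverse_if_stops_out_of_order : Prop := ∀ (stops : List (List (String × String))) (first_expected_stop_name : String) (second_expected_stop_name : String), Dom_reverse_if_stops_out_of_order stops first_expected_stop_name second_expected_stop_name → Pre_reverse_if_stops_out_of_order stops first_expected_stop_name second_expected_stop_name → Spec_reverse_if_stops_out_of_order stops first_expected_stop_name second_expected_stop_name (reverse_if_stops_out_of_order stops first_expected_stop_name second_expected_stop_name)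

-- ===== LEMMAS AND PROOFS =====

-- B's loop computes exactly the pair of first-occurrence indices that A's two scans compute.
theorem pvLoopB_eq (fn sn : String) :
    ∀ (stops : List (List (String × String))) (k : Nat) (i? j? : Option Nat),
      pvLoopB k i? j? fn sn stops =
        (i?.elim (pvScanA k stops fn) some, j?.elim (pvScanA k stops sn) some) := by
  intro stops
  induction stops with
  | nil => intro k i? j?; cases i? <;> cases j? <;> simp [pvLoopB, pvScanA]
  | cons s rest ih =>
    intro k i? j?
    simp only [pvLoopB, pvScanA]
    by_cases h3 : fn = sn
    · subst h3
      cases i? <;> cases j? <;> by_cases h1 : pvName s = some fn <;> simp [h1, ih]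
    · have h3' : ¬sn = fn := fun h => h3 h.symm
      cases i? <;> cases j? <;>
        by_cases h1 : pvName s = some fn <;> by_cases h2 : pvName s = some sn <;>
          simp [h1, h2, h3, h3', ih]

theorem a_eq_b (stops : List (List (String × String))) (fn sn : String) :
    reverse_if_stops_out_of_order stops fn sn = reverse_if_stops_out_of_order_alt stops fn sn := by
  unfold reverse_if_stops_out_of_order reverse_if_stops_out_of_order_alt
  rw [pvLoopB_eq]
  cases pvScanA 0 stops fn <;> cases pvScanA 0 stops sn <;> simp [Option.elim]

-- ===== VERDICT (by name: the statement is the Claim_ definition above) =====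
theorem reverse_if_stops_out_of_order_spec : Claim_equal_reverse_if_stops_out_of_order := by
  intro stops fn sn _ _
  unfold Spec_reverse_if_stops_out_of_order
  exact a_eq_b stops fn sn
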